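-- pv_equiv track=rewrite | github.com/gtmanfred/Euler | e126.py | calc
-- ===== SOURCE A (Python) =====
-- def calc(x,y,z,l):
--     c = lambda x,y,z:x*y*2+x*z*2+z*y*2
--     if l == 1:
--         return c(x,y,z)
--     else:
--         a = (l-1)*2-1
--         return x*4*a+y*4*a+z*4*a+calc(x,y,z,l-1)
--         '''
--         tmp = c(x,y,z)
--         for i in range(2,l+1):
--             #tmp += c(x,y,z)
--             a = (i-1)*2-1
--             tmp+=x*4*a+y*4*a+z*4*a
--         return tmp
--         '''
-- ===== SOURCE B (Python) =====
-- def calc(x, y, z, l):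
--     # closed form: surface cubes of layer l = base surface + 4*(x+y+z)*(l-1)^2
--     return 2 * (x*y + x*z + y*z) + 4 * (x + y + z) * (l - 1) ** 2
-- ===== Notes on version B (the rewrite author's own statement) =====
-- stated objective: faster
-- what changed: Replaced the l-deep recursion with the closed-form c(x,y,z)+4(x+y+z)(l-1)^2 obtained by summing the arithmetic series of layer increments.
import Mathlib
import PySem

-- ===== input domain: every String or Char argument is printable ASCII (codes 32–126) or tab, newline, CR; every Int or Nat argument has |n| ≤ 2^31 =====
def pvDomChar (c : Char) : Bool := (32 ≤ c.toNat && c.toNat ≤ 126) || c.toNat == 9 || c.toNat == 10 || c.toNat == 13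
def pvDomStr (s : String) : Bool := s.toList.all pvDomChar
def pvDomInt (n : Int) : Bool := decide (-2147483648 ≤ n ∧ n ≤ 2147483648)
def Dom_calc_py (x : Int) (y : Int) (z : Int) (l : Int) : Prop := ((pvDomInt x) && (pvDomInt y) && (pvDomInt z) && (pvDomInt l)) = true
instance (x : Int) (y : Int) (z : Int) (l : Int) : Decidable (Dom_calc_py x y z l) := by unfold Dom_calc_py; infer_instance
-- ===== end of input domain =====

-- B replaces A's l-deep recursion by the closed form c(x,y,z) + 4*(x+y+z)*(l-1)^2 (objective: faster, O(1) vs O(l)).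

-- ===== PORT A =====
-- literal port of A's recursion; the `l < 1` guard only makes the recursion total
-- (Python diverges/raises RecursionError there; Pre_ excludes it).
def calc_py (x : Int) (y : Int) (z : Int) (l : Int) : Int :=
  if l = 1 then
    x*y*2 + x*z*2 + z*y*2
  else if l < 1 then
    0
  else
    let a := (l-1)*2 - 1
    x*4*a + y*4*a + z*4*a + calc_py x y z (l-1)
termination_by l.toNat
decreasing_by omega

-- ===== PORT B =====
def calc_py_alt (x : Int) (y : Int) (z : Int) (l : Int) : Int :=
  2 * (x*y + x*z + y*z) + 4 * (x + y + z) * (l - 1) ^ 2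

-- ===== PRECONDITION & SPEC =====
-- Pre_ excludes l < 1, where Python A never reaches its base case and raises RecursionError.
def Pre_calc_py (x : Int) (y : Int) (z : Int) (l : Int) : Prop := 1 ≤ l
instance (x : Int) (y : Int) (z : Int) (l : Int) : Decidable (Pre_calc_py x y z l) := by unfold Pre_calc_py; infer_instance
def pvWitness_calc_py : Int × Int × Int × Int := (3, 2, 1, 4)

def Spec_calc_py (x : Int) (y : Int) (z : Int) (l : Int) (out : Int) : Prop := out = calc_py_alt x y z l
instance (x : Int) (y : Int) (z : Int) (l : Int) (out : Int) : Decidable (Spec_calc_py x y z l out) := by unfold Spec_calc_py; infer_instance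

-- ===== CLAIM (what is proved, stated in full; the proofs are below) =====
def Claim_equal_calc_py : Prop := ∀ (x : Int) (y : Int) (z : Int) (l : Int), Dom_calc_py x y z l → Pre_calc_py x y z l → Spec_calc_py x y z l (calc_py x y z l)

-- ===== LEMMAS AND PROOFS =====
theorem calc_py_closed (x y z : Int) (l : Int) (hl : 1 ≤ l) :
    calc_py x y z l = 2 * (x*y + x*z + y*z) + 4 * (x + y + z) * (l - 1) ^ 2 := by
  induction l, hl using Int.le_induction with
  | base => rw [calc_py]; simp; ring
  | succ n hn ih =>
    rw [calc_py]
    have h1 : ¬ (n + 1 = 1) := by omega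
    have h2 : ¬ (n + 1 < 1) := by omega
    simp only [h1, h2, if_false]
    rw [show n + 1 - 1 = n by ring, ih]
    ring

-- ===== VERDICT (by name: the statement is the Claim_ definition above) =====
theorem calc_py_spec : Claim_equal_calc_py := by
  intro x y z l _ hl
  unfold Spec_calc_py calc_py_alt
  exact calc_py_closed x y z l hl
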